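-- pv_equiv track=rewrite | github.com/yangbing668/gas_python | EUR_predict.py | sum_year_production
-- ===== SOURCE A (Python) =====
-- def sum_year_production(data, n=330):
--     sums = []
--     i = 0
--     while i < len(data):
--         chunk = data[i:i + n]
--         sums.append(sum(chunk))
--         i += n
--     return sums
-- ===== SOURCE B (Python) =====
-- def sum_year_production(data, n=330):
--     # Single pass with a running accumulator and counter instead of index-based slicing.
--     sums = []
--     acc = 0
--     cnt = 0
--     for x in data:
--         acc += x
--         cnt += 1
--         if cnt == n:
--             sums.append(acc)
--             acc = 0
--             cnt = 0
--     if cnt: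
--         sums.append(acc)
--     return sums
-- ===== Notes on version B (the rewrite author's own statement) =====
-- stated objective: simpler
-- what changed: Replaces the index-stepping while loop with slice materialization by a single pass over the elements keeping a running sum and counter that flush every n elements (and once at the end for a partial chunk).
-- outside the precondition, e.g. on sum_year_production([1, 2], 0): A does not finish within the time limit, B returns [3]; on sum_year_production([1], -1): A does not finish within the time limit, B returns [1]
import Mathlib
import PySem

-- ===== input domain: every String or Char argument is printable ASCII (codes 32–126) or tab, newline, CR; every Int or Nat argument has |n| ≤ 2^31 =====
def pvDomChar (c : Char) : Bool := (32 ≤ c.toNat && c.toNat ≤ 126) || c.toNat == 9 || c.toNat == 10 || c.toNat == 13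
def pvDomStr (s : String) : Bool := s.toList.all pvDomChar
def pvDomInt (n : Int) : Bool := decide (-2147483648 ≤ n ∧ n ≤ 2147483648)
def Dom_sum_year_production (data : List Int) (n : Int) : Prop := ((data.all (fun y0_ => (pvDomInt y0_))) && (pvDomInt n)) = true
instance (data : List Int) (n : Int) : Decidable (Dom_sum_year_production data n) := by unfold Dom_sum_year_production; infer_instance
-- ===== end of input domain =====

-- B replaces A's index-stepping slice loop by a single pass with a running accumulator and counter (objective: simpler).


-- ===== PORT A =====
-- A's while loop; fuel = data.length + 1 iterations suffice whenever the Python loop terminates (n ≥ 1 or data = [])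
def pvALoop (data : List Int) (n : Int) : Nat → Int → List Int → List Int
  | 0, _, sums => sums
  | fuel + 1, i, sums =>
    if i < (data.length : Int) then
      -- chunk = data[i:i+n]; sums.append(sum(chunk)); i += n
      pvALoop data n fuel (i + n) (sums ++ [(PySem.List.slice data (some i) (some (i + n))).sum])
    else sums

def sum_year_production (data : List Int) (n : Int) : List Int :=
  pvALoop data n (data.length + 1) 0 []

-- ===== PORT B =====
def pvBLoop (n : Int) : List Int → Int → Int → List Int → List Int
  | [], acc, cnt, sums => if cnt ≠ 0 then sums ++ [acc] else sums
  | x :: xs, acc, cnt, sums =>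
    if cnt + 1 == n then pvBLoop n xs 0 0 (sums ++ [acc + x])
    else pvBLoop n xs (acc + x) (cnt + 1) sums

def sum_year_production_alt (data : List Int) (n : Int) : List Int :=
  pvBLoop n data 0 0 []

-- ===== PRECONDITION & SPEC =====
-- Pre_ excludes only inputs on which A never returns: for n ≤ 0 and nonempty data the
-- Python while loop does not terminate (i never reaches len(data)).
def Pre_sum_year_production (data : List Int) (n : Int) : Prop := data = [] ∨ 1 ≤ n
instance (data : List Int) (n : Int) : Decidable (Pre_sum_year_production data n) := by unfold Pre_sum_year_production; infer_instance
def pvWitness_sum_year_production : List Int × Int := ([1, 2, 3, 4, 5], 2)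

def Spec_sum_year_production (data : List Int) (n : Int) (out : List Int) : Prop := out = sum_year_production_alt data n
instance (data : List Int) (n : Int) (out : List Int) : Decidable (Spec_sum_year_production data n out) := by unfold Spec_sum_year_production; infer_instance

-- ===== CLAIM (what is proved, stated in full; the proofs are below) =====
def Claim_equal_sum_year_production : Prop := ∀ (data : List Int) (n : Int), Dom_sum_year_production data n → Pre_sum_year_production data n → Spec_sum_year_production data n (sum_year_production data n)

-- ===== LEMMAS AND PROOFS =====

-- common reference: sums of consecutive chunks of size m+1
def pvChunkSums (m : Nat) : List Int → List Int
  | [] => []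
  | x :: xs => ((x :: xs).take (m + 1)).sum :: pvChunkSums m ((x :: xs).drop (m + 1))
termination_by l => l.length
decreasing_by simp

lemma pvChunkSums_nil (m : Nat) : pvChunkSums m [] = [] := by
  unfold pvChunkSums
  rfl

lemma pvChunkSums_ne_nil (m : Nat) (l : List Int) (h : l ≠ []) :
    pvChunkSums m l = (l.take (m + 1)).sum :: pvChunkSums m (l.drop (m + 1)) := by
  cases l with
  | nil => exact absurd rfl h
  | cons x xs => conv_lhs => unfold pvChunkSums

-- A's loop computes the chunk sums of the suffix starting at index i
lemma pvALoop_spec (data : List Int) (n : Int) (hn : 1 ≤ n) :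
    ∀ fuel (i : Nat) (sums : List Int), data.length - i < fuel →
      pvALoop data n fuel (i : Int) sums = sums ++ pvChunkSums (n.toNat - 1) (data.drop i) := by
  intro fuel
  induction fuel with
  | zero => intro i sums h; omega
  | succ fuel ih =>
    intro i sums h
    rw [pvALoop]
    by_cases hi : (i : Int) < (data.length : Int)
    · rw [if_pos hi]
      have hlen : i < data.length := by exact_mod_cast hi
      have hrw : (i : Int) + n = (i : Int) + ((n.toNat : Nat) : Int) := by omega
      rw [hrw, PySem.List.slice_natCast_add]
      have hcast : (i : Int) + ((n.toNat : Nat) : Int) = ((i + n.toNat : Nat) : Int) := by push_cast; ring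
      rw [hcast]
      have hok : data.length - (i + n.toNat) < fuel := by omega
      have hih := ih (i + n.toNat) (sums ++ [((data.drop i).take n.toNat).sum]) hok
      rw [hih]
      have hdrop : data.drop (i + n.toNat) = (data.drop i).drop n.toNat := by
        rw [List.drop_drop]
      have hne : data.drop i ≠ [] := by
        intro hc
        have := List.length_drop (l := data) (i := i)
        rw [hc] at this
        simp at this
        omega
      rw [hdrop, pvChunkSums_ne_nil _ _ hne]
      have hm : (n.toNat - 1) + 1 = n.toNat := by omega
      rw [hm]
      simp
    · rw [if_neg hi]
      have hle : data.length ≤ i := by exact_mod_cast not_lt.mp hi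
      rw [List.drop_eq_nil_of_le hle, pvChunkSums_nil]
      simp

-- one full-or-partial chunk of B's loop; k elements are still needed to fill the current chunk
lemma pvBLoop_step (n : Int) (_hn : 1 ≤ n) :
    ∀ (l : List Int) (k : Nat), 1 ≤ k → (k : Int) ≤ n →
      ∀ (acc : Int) (sums : List Int),
      pvBLoop n l acc (n - k) sums =
        if l.length < k then
          (if l = [] ∧ (k : Int) = n then sums else sums ++ [acc + l.sum])
        else pvBLoop n (l.drop k) 0 0 (sums ++ [acc + (l.take k).sum]) := by
  intro l
  induction l with
  | nil =>
    intro k hk hkn acc sums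
    rw [pvBLoop]
    simp only [List.length_nil, List.sum_nil, add_zero, List.drop_nil, List.take_nil,
      true_and]
    rw [if_pos (show 0 < k by omega)]
    split_ifs with h1 h2 <;> first | rfl | omega
  | cons x xs ih =>
    intro k hk hkn acc sums
    obtain ⟨k', rfl⟩ : ∃ k', k = k' + 1 := ⟨k - 1, by omega⟩
    rw [pvBLoop]
    by_cases hk1 : k' = 0
    · subst hk1
      have hc : ((n - (((0 + 1 : Nat) : Int)) + 1) == n) = true := by
        simp only [beq_iff_eq]; push_cast; ring
      rw [if_pos hc, if_neg (show ¬(x :: xs).length < 0 + 1 by simp)]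
      simp
    · have hne : ¬ ((n - (((k' + 1 : Nat) : Int)) + 1) == n) = true := by
        simp only [beq_iff_eq]; push_cast; omega
      rw [if_neg hne]
      have harg : n - (((k' + 1 : Nat) : Int)) + 1 = n - ((k' : Nat) : Int) := by push_cast; ring
      rw [harg, ih k' (by omega) (by push_cast at hkn ⊢; omega) (acc + x) sums]
      by_cases hl : xs.length < k'
      · rw [if_pos hl, if_pos (show (x :: xs).length < k' + 1 by simp only [List.length_cons]; omega)]
        have hkne : ¬ (xs = [] ∧ ((k' : Nat) : Int) = n) := by
          rintro ⟨-, hc2⟩; push_cast at hkn; omega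
        rw [if_neg hkne,
          if_neg (show ¬ ((x :: xs) = [] ∧ (((k' + 1 : Nat) : Int)) = n) by rintro ⟨h, -⟩; cases h)]
        simp only [List.sum_cons]
        have : acc + x + xs.sum = acc + (x + xs.sum) := by ring
        rw [this]
      · rw [if_neg hl, if_neg (show ¬ (x :: xs).length < k' + 1 by simp only [List.length_cons]; omega)]
        have hdrop : List.drop k' xs = List.drop (k' + 1) (x :: xs) := by simp
        have htake : acc + x + (List.take k' xs).sum = acc + (List.take (k' + 1) (x :: xs)).sum := by
          rw [List.take_succ_cons, List.sum_cons]; ring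
        rw [hdrop, htake]

-- B's loop from a fresh-chunk state computes the chunk sums
lemma pvBLoop_spec (n : Int) (hn : 1 ≤ n) :
    ∀ (N : Nat) (l : List Int), l.length ≤ N → ∀ (sums : List Int),
      pvBLoop n l 0 0 sums = sums ++ pvChunkSums (n.toNat - 1) l := by
  intro N
  induction N with
  | zero =>
    intro l hl sums
    have : l = [] := List.eq_nil_of_length_eq_zero (by omega)
    subst this
    rw [pvBLoop, pvChunkSums_nil]
    simp
  | succ N ih =>
    intro l hl sums
    cases l with
    | nil => rw [pvBLoop, pvChunkSums_nil]; simp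
    | cons x xs =>
      have h0 : (0 : Int) = n - ((n.toNat : Nat) : Int) := by omega
      nth_rewrite 2 [h0]
      rw [pvBLoop_step n hn (x :: xs) n.toNat (by omega) (by omega)]
      rw [pvChunkSums_ne_nil _ _ (by simp)]
      have hm : (n.toNat - 1) + 1 = n.toNat := by omega
      rw [hm]
      by_cases hl2 : (x :: xs).length < n.toNat
      · rw [if_pos hl2, if_neg (show ¬ ((x :: xs) = [] ∧ ((n.toNat : Nat) : Int) = n) by
            rintro ⟨h, -⟩; cases h)]
        rw [List.take_of_length_le (by omega), List.drop_eq_nil_of_le (by omega), pvChunkSums_nil]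
        simp
      · rw [if_neg hl2]
        rw [ih ((x :: xs).drop n.toNat) (by
          have h1 : 1 ≤ n.toNat := by omega
          simp only [List.length_cons] at hl hl2
          simp only [List.length_drop, List.length_cons]
          omega)]
        simp

-- ===== VERDICT (by name: the statement is the Claim_ definition above) =====
theorem sum_year_production_spec : Claim_equal_sum_year_production := by
  intro data n _ hpre
  unfold Spec_sum_year_production sum_year_production sum_year_production_alt
  rcases hpre with h | hn
  · subst h
    rw [pvALoop, pvBLoop]
    simp
  · have hA := pvALoop_spec data n hn (data.length + 1) 0 [] (by omega)
    simp only [Nat.cast_zero] at hA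
    rw [hA, List.drop_zero, pvBLoop_spec n hn data.length data le_rfl []]
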